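-- pv_equiv track=rewrite | github.com/BolluHimana/CP-2 | 09-shortenlongruns-Python/shortenlongruns.py | shortenlongruns
-- ===== SOURCE A (Python) =====
-- def shortenlongruns(L, k):
-- 	n=0
-- 	l=[]
-- 	for i in range(len(L)):
-- 		if L[i] not in l:
-- 			l.append(L[i])
-- 			n=1
-- 		elif L[i]!=L[i-1]:
-- 			l.append(L[i])
-- 			n=1
-- 		elif L[i]==L[i-1]:
-- 			n=n+1
-- 			if n>=k:
-- 				continue
-- 			else:
-- 				l.append(L[i])
-- 	return l
-- ===== SOURCE B (Python) =====
-- def shortenlongruns(L, k):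
--     # Walk consecutive runs with two indices; keep at most max(1, k-1) of each run.
--     out = []
--     i = 0
--     n = len(L)
--     while i < n:
--         j = i
--         while j < n and L[j] == L[i]:
--             j += 1
--         keep = min(j - i, max(1, k - 1))
--         out.extend(L[i:i + keep])
--         i = j
--     return out
-- ===== Notes on version B (the rewrite author's own statement) =====
-- stated objective: faster
-- what changed: Replaces the index loop with its 'L[i] not in l' membership scan of the growing output and the per-element previous-element comparison by a two-pointer walk over consecutive runs that keeps min(run length, max(1, k-1)) elements of each run via a slice, dropping the membership test entirely.
import Mathlib
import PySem

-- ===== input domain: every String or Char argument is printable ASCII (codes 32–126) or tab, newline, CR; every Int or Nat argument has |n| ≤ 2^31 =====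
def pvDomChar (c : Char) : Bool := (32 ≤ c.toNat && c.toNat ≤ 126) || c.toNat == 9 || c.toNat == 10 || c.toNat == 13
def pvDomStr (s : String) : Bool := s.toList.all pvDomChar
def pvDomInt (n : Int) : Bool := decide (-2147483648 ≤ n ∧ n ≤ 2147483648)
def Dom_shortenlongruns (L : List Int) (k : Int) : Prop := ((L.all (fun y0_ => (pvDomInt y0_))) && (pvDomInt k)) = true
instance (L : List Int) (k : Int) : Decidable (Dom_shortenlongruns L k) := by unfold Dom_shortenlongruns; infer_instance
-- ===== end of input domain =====

-- B replaces A's index loop (with its membership scan of the growing output) by a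
-- run-by-run walk that keeps min(run length, max(1, k-1)) elements of each run. (objective: faster)


-- ===== PORT A =====
-- loop body of A's for-loop; state is (n, l). Indices i and (for the branches that
-- read it) i-1 are always in range (i-1 = -1 wraps to the last element in Python,
-- which pyGetD handles), so the default 0 of pyGetD is never used.
def stepA (L : List Int) (k : Int) (st : Int × List Int) (i : Int) : Int × List Int :=
  let n := st.1
  let l := st.2
  let x := PySem.List.pyGetD L i 0
  if l.contains x = false then (1, l ++ [x])
  else if x ≠ PySem.List.pyGetD L (i - 1) 0 then (1, l ++ [x])
  else if x = PySem.List.pyGetD L (i - 1) 0 then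
    (if n + 1 ≥ k then (n + 1, l) else (n + 1, l ++ [x]))
  else (n, l)

def shortenlongruns (L : List Int) (k : Int) : List Int :=
  ((PySem.List.pyRange 0 (L.length : Int) 1).foldl (stepA L k) (0, [])).2

-- ===== PORT B =====
-- Source B's outer while loop = recursion on the list; the inner while that advances j
-- through the run is takeWhile/dropWhile; L[i:i+keep] is `take` of the run.
def shortenlongruns_alt (L : List Int) (k : Int) : List Int :=
  match L with
  | [] => []
  | x :: rest =>
      let run := x :: rest.takeWhile (· == x)
      let keep : Int := min (run.length : Int) (max 1 (k - 1))
      run.take keep.toNat ++ shortenlongruns_alt (rest.dropWhile (· == x)) k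
termination_by L.length
decreasing_by
  simp only [List.length_cons]
  have := List.length_dropWhile_le (· == x) rest
  omega

-- ===== PRECONDITION & SPEC =====
def Spec_shortenlongruns (L : List Int) (k : Int) (out : List Int) : Prop := out = shortenlongruns_alt L k
instance (L : List Int) (k : Int) (out : List Int) : Decidable (Spec_shortenlongruns L k out) := by unfold Spec_shortenlongruns; infer_instance

-- ===== CLAIM (what is proved, stated in full; the proofs are below) =====
def Claim_equal_shortenlongruns : Prop := ∀ (L : List Int) (k : Int), Dom_shortenlongruns L k → Spec_shortenlongruns L k (shortenlongruns L k)

-- ===== LEMMAS AND PROOFS =====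

-- Canonical run-processing both ports are reduced to: prev = value of the current run,
-- n = its length so far; an element equal to prev is kept iff n+1 < k.
def runsF (k : Int) (prev n : Int) : List Int → List Int
  | [] => []
  | x :: xs =>
      if x = prev then
        (if n + 1 ≥ k then runsF k prev (n + 1) xs else x :: runsF k prev (n + 1) xs)
      else x :: runsF k x 1 xs

def runsTop (k : Int) : List Int → List Int
  | [] => []
  | x :: xs => x :: runsF k x 1 xs

-- (prev, n) state after scanning a list
def scanSt (prev n : Int) : List Int → Int × Int
  | [] => (prev, n)
  | x :: xs => if x = prev then scanSt prev (n + 1) xs else scanSt x 1 xs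

def stTop : List Int → Int × Int
  | [] => (0, 0)
  | x :: xs => scanSt x 1 xs

lemma scanSt_snoc (y : Int) : ∀ (xs : List Int) (prev n : Int),
    scanSt prev n (xs ++ [y]) =
      (if y = (scanSt prev n xs).1 then ((scanSt prev n xs).1, (scanSt prev n xs).2 + 1) else (y, 1)) := by
  intro xs
  induction xs with
  | nil => intro prev n; simp [scanSt]
  | cons x xs ih =>
      intro prev n
      by_cases h : x = prev <;> simp [scanSt, h, ih]

lemma runsF_snoc (k y : Int) : ∀ (xs : List Int) (prev n : Int),
    runsF k prev n (xs ++ [y]) =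
      runsF k prev n xs ++
        (if y = (scanSt prev n xs).1 then
          (if (scanSt prev n xs).2 + 1 ≥ k then [] else [y]) else [y]) := by
  intro xs
  induction xs with
  | nil =>
      intro prev n
      by_cases h : y = prev <;> simp [runsF, scanSt, h] <;> split <;> simp
  | cons x xs ih =>
      intro prev n
      by_cases h : x = prev <;> simp [runsF, scanSt, h, ih] <;> split <;> simp

lemma stTop_snoc (y : Int) (t : List Int) (ht : t ≠ []) :
    stTop (t ++ [y]) =
      (if y = (stTop t).1 then ((stTop t).1, (stTop t).2 + 1) else (y, 1)) := by
  cases t with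
  | nil => exact absurd rfl ht
  | cons h r => simp [stTop, scanSt_snoc]

lemma runsTop_snoc (k y : Int) (t : List Int) (ht : t ≠ []) :
    runsTop k (t ++ [y]) =
      runsTop k t ++
        (if y = (stTop t).1 then (if (stTop t).2 + 1 ≥ k then [] else [y]) else [y]) := by
  cases t with
  | nil => exact absurd rfl ht
  | cons h r => simp [runsTop, stTop, runsF_snoc]

lemma scanSt_fst_snoc (y : Int) (xs : List Int) (prev n : Int) :
    (scanSt prev n (xs ++ [y])).1 = y := by
  rw [scanSt_snoc]; split <;> simp_all

lemma stTop_fst_snoc (y : Int) (t : List Int) : (stTop (t ++ [y])).1 = y := by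
  cases t with
  | nil => simp [stTop, scanSt]
  | cons h r => simp [stTop, scanSt_fst_snoc]

lemma mem_runsF (k : Int) : ∀ (xs : List Int) (prev n y : Int),
    y ∈ xs → y = prev ∨ y ∈ runsF k prev n xs := by
  intro xs
  induction xs with
  | nil => intro prev n y hy; simp at hy
  | cons x xs ih =>
      intro prev n y hy
      rcases List.mem_cons.mp hy with rfl | hy
      · by_cases h : y = prev
        · exact Or.inl h
        · right; simp [runsF, h]
      · by_cases h : x = prev
        · rcases ih prev (n + 1) y hy with h' | h'
          · exact Or.inl h'
          · right
            simp only [runsF]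
            rw [if_pos h]
            split
            · exact h'
            · exact List.mem_cons_of_mem _ h'
        · rcases ih x 1 y hy with rfl | h'
          · right; simp [runsF, h]
          · right; simp [runsF, h, h']

lemma mem_runsTop (k : Int) (xs : List Int) (y : Int) (hy : y ∈ xs) :
    y ∈ runsTop k xs := by
  cases xs with
  | nil => simp at hy
  | cons x xs =>
      rcases List.mem_cons.mp hy with rfl | hy
      · simp [runsTop]
      · rcases mem_runsF k xs x 1 y hy with rfl | h
        · simp [runsTop]
        · simp [runsTop, h]

-- A's fold after the first m indices equals the canonical run processing of L.take m.
lemma foldA (L : List Int) (k : Int) : ∀ (m : Nat), m ≤ L.length →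
    (PySem.List.pyRange 0 (m : Int) 1).foldl (stepA L k) (0, []) =
      ((stTop (L.take m)).2, runsTop k (L.take m)) := by
  intro m
  induction m with
  | zero => intro _; simp [stTop, runsTop]
  | succ m ih =>
      intro hm
      have hmlt : m < L.length := by omega
      have hcast : ((m + 1 : Nat) : Int) = (m : Int) + 1 := by push_cast; ring
      rw [hcast, PySem.List.pyRange_one_succ_right (by positivity), List.foldl_append,
        ih (by omega)]
      have htake : L.take (m + 1) = L.take m ++ [L[m]] := by
        rw [List.take_add_one]
        simp [List.getElem?_eq_getElem hmlt]
      have hx : PySem.List.pyGetD L (m : Int) 0 = L[m] := by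
        simp [PySem.List.pyGetD_natCast, List.getD_eq_getElem?_getD, List.getElem?_eq_getElem hmlt]
      simp only [List.foldl_cons, List.foldl_nil]
      rcases Nat.eq_zero_or_pos m with rfl | hmpos
      · -- first step: l = [], membership test fails, branch 1
        have hx0 : PySem.List.pyGetD L 0 0 = L[0] := by simpa using hx
        simp [stepA, hx0, htake, stTop, scanSt, runsTop, runsF]
      · -- m ≥ 1: previous element is L[m-1] = (stTop (L.take m)).1
        have hm1lt : m - 1 < L.length := by omega
        have htakem : L.take m = L.take (m - 1) ++ [L[m - 1]] := by
          conv_lhs => rw [show m = (m - 1) + 1 by omega]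
          rw [List.take_add_one]
          simp [List.getElem?_eq_getElem hm1lt]
        have hne : L.take m ≠ [] := by
          rw [Ne, List.take_eq_nil_iff]
          rintro (h | h)
          · omega
          · subst h; simp at hmlt
        have hprevmem : L[m - 1] ∈ L.take m := by
          rw [htakem]
          exact List.mem_append_right _ (List.mem_singleton_self _)
        have hfst : (stTop (L.take m)).1 = L[m - 1] := by rw [htakem, stTop_fst_snoc]
        have hprev : PySem.List.pyGetD L ((m : Int) - 1) 0 = L[m - 1] := by
          have : ((m : Int) - 1) = ((m - 1 : Nat) : Int) := by omega
          rw [this]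
          simp [PySem.List.pyGetD_natCast, List.getD_eq_getElem?_getD,
            List.getElem?_eq_getElem hm1lt]
        rw [htake, stTop_snoc _ _ hne, runsTop_snoc _ _ _ hne, hfst]
        by_cases heq : L[m] = L[m - 1]
        · -- run continues: element is in the output so far, equal to previous
          have hmem : L[m] ∈ runsTop k (L.take m) := mem_runsTop k _ _ (heq ▸ hprevmem)
          have hcf : ¬((runsTop k (L.take m)).contains L[m] = false) := by
            simp only [Bool.not_eq_false]
            exact List.elem_eq_true_of_mem hmem
          simp only [stepA, hx, hprev]
          rw [if_neg hcf, if_neg (by simp [heq]), if_pos heq]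
          simp only [if_pos heq]
          by_cases hk : (stTop (L.take m)).2 + 1 ≥ k
          · simp [hk]
          · simp [hk]
        · -- new run: both the "not in l" and the "≠ previous" branch give (1, l ++ [x])
          simp only [stepA, hx, hprev]
          simp only [if_neg heq]
          by_cases hc : (runsTop k (L.take m)).contains L[m] = false
          · rw [if_pos hc]
          · rw [if_neg hc, if_pos (by exact heq)]
  
lemma shortenlongruns_eq_runsTop (L : List Int) (k : Int) :
    shortenlongruns L k = runsTop k L := by
  unfold shortenlongruns
  rw [foldA L k L.length (le_refl _)]
  simp

-- B side -------------------------------------------------------------------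

lemma takeWhile_eq_replicate (x : Int) : ∀ (l : List Int),
    l.takeWhile (· == x) = List.replicate (l.takeWhile (· == x)).length x := by
  intro l
  induction l with
  | nil => simp
  | cons y ys ih =>
      by_cases h : y = x
      · subst h; simp only [List.takeWhile_cons, beq_self_eq_true, if_true]
        simp [List.replicate_succ, ← ih]
      · simp [h]

lemma head?_dropWhile_ne (x : Int) (l : List Int) :
    ∀ z ∈ (l.dropWhile (· == x)).head?, z ≠ x := by
  intro z hz
  have := List.head?_dropWhile_not (· == x) l
  cases h : (l.dropWhile (· == x)).head? with
  | none => simp [h] at hz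
  | some w =>
      rw [h] at this hz
      simp at this hz
      subst hz; exact this

lemma runsF_replicate (k x : Int) : ∀ (m : Nat) (n : Int) (zs : List Int),
    (∀ z ∈ zs.head?, z ≠ x) →
    runsF k x n (List.replicate m x ++ zs) =
      List.replicate (min m (k - 1 - n).toNat) x ++ runsTop k zs := by
  intro m
  induction m with
  | zero =>
      intro n zs hzs
      cases zs with
      | nil => simp [runsF, runsTop]
      | cons z zs' =>
          have hne : z ≠ x := hzs z (by simp)
          simp [runsF, runsTop, hne]
  | succ m ih =>
      intro n zs hzs
      rw [List.replicate_succ]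
      simp only [List.cons_append, runsF]
      rw [ih (n + 1) zs hzs]
      by_cases h : n + 1 ≥ k
      · rw [if_pos h]
        have h1 : min (m + 1) (k - 1 - n).toNat = 0 := by omega
        have h2 : min m (k - 1 - (n + 1)).toNat = 0 := by omega
        simp [h1, h2]
      · rw [if_neg h]
        have h1 : min (m + 1) (k - 1 - n).toNat = min m (k - 1 - (n + 1)).toNat + 1 := by omega
        rw [h1, List.replicate_succ]
        simp

lemma alt_eq_runsTop (k : Int) : ∀ (L : List Int), shortenlongruns_alt L k = runsTop k L := by
  intro L
  induction L using shortenlongruns_alt.induct (k := k) with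
  | case1 => simp [shortenlongruns_alt, runsTop]
  | case2 x rest ih =>
      rw [shortenlongruns_alt]
      have hwrep : rest.takeWhile (· == x) = List.replicate (rest.takeWhile (· == x)).length x :=
        takeWhile_eq_replicate x rest
      have hhead : ∀ z ∈ (rest.dropWhile (· == x)).head?, z ≠ x := head?_dropWhile_ne x rest
      have hrt : runsTop k (x :: rest) =
          x :: (List.replicate (min (rest.takeWhile (· == x)).length (k - 2).toNat) x
            ++ runsTop k (rest.dropWhile (· == x))) := by
        calc runsTop k (x :: rest)
            = x :: runsF k x 1 (List.replicate (rest.takeWhile (· == x)).length x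
                ++ rest.dropWhile (· == x)) := by
              conv_lhs => rw [← List.takeWhile_append_dropWhile (p := (· == x)) (l := rest)]
              rw [runsTop]
              conv_lhs => rw [hwrep]
          _ = x :: (List.replicate (min (rest.takeWhile (· == x)).length (k - 1 - 1).toNat) x
                ++ runsTop k (rest.dropWhile (· == x))) := by
              rw [runsF_replicate k x _ 1 _ hhead]
          _ = _ := by rw [show k - 1 - 1 = k - 2 by ring]
      rw [ih, hrt]
      -- LHS: run = x :: takeWhile is a constant run; take keep.toNat of it
      have hrun : x :: rest.takeWhile (· == x) =
          List.replicate ((rest.takeWhile (· == x)).length + 1) x := by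
        rw [List.replicate_succ, ← hwrep]
      rw [hrun, List.take_replicate]
      have hkeep : min (min ((List.replicate ((rest.takeWhile (· == x)).length + 1) x).length : Int)
            (max 1 (k - 1))).toNat ((rest.takeWhile (· == x)).length + 1)
          = min (rest.takeWhile (· == x)).length (k - 2).toNat + 1 := by
        simp only [List.length_replicate]
        omega
      rw [hkeep]
      simp [List.replicate_succ]

-- ===== VERDICT (by name: the statement is the Claim_ definition above) =====
theorem shortenlongruns_spec : Claim_equal_shortenlongruns := by
  intro L k _
  unfold Spec_shortenlongruns
  rw [shortenlongruns_eq_runsTop, alt_eq_runsTop]
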